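-- pv_equiv track=rewrite | github.com/xiaoasdf/TeleRAG | app.py | _format_source_org_counts
-- ===== SOURCE A (Python) =====
-- def _format_source_org_counts(ingest_state: dict | None) -> str:
--     if not ingest_state:
--         return "未生成"
--     counts = {}
--     for record in ingest_state.get("records", []):
--         source_org = record.get("source_org", "unknown")
--         counts[source_org] = counts.get(source_org, 0) + 1
--     if not counts:
--         return "未生成"
--     return ", ".join(f"{key}={value}" for key, value in sorted(counts.items()))
-- ===== SOURCE B (Python) =====
-- def _format_source_org_counts(ingest_state: dict | None) -> str:
--     if not ingest_state:
--         return "未生成"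
--     orgs = sorted(r.get("source_org", "unknown") for r in ingest_state.get("records", []))
--     if not orgs:
--         return "未生成"
--     parts = []
--     run_key, run_len = orgs[0], 1
--     for org in orgs[1:]:
--         if org == run_key:
--             run_len += 1
--         else:
--             parts.append(f"{run_key}={run_len}")
--             run_key, run_len = org, 1
--     parts.append(f"{run_key}={run_len}")
--     return ", ".join(parts)
-- ===== Notes on version B (the rewrite author's own statement) =====
-- stated objective: alternative
-- what changed: B sorts the list of per-record source_org values once and emits 'key=count' parts by run-length encoding in a single scan, instead of A's building a count dict in one pass and then sorting its items.
import Mathlib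
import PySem

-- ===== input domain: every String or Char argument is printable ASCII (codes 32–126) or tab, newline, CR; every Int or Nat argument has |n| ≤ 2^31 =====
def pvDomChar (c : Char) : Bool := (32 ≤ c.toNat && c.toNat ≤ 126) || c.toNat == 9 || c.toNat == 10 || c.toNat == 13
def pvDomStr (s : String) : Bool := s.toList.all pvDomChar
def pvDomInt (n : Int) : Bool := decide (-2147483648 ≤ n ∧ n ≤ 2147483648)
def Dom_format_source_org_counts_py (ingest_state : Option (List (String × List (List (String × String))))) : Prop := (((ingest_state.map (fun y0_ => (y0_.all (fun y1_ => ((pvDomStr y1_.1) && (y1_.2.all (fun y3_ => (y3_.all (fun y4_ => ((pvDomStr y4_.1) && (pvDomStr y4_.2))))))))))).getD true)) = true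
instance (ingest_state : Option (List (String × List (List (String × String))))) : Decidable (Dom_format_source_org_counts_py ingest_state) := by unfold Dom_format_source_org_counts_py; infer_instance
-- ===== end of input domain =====

-- B sorts the per-record source_org list once and emits run-lengths in a single scan,
-- instead of A's dict counting followed by sorting the items (objective: alternative).

-- ===== PORT A =====
def format_source_org_counts_py (ingest_state : Option (List (String × List (List (String × String))))) : String :=
  match ingest_state with
  | none => "未生成"
  | some st =>
    if st = [] then "未生成"
    else
      let counts := ((PySem.Dict.ofList st).getD "records" []).foldl
        (fun c record =>
          let source_org := (PySem.Dict.ofList record).getD "source_org" "unknown"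
          c.insert source_org (c.getD source_org 0 + 1))
        PySem.Dict.empty
      if counts.items = [] then "未生成"
      else PySem.Str.join ", "
        ((PySem.List.sorted2 counts.items (fun p => p.1) (fun p => p.2)).map
          (fun p => p.1 ++ "=" ++ PySem.Int.toStr p.2))

-- ===== PORT B =====
-- the run-length loop of Source B (run_key/run_len accumulator, parts built left to right)
def pvRunsGo (run_key : String) (run_len : Int) : List String → List String
  | [] => [run_key ++ "=" ++ PySem.Int.toStr run_len]
  | org :: rest =>
    if org = run_key then pvRunsGo run_key (run_len + 1) rest
    else (run_key ++ "=" ++ PySem.Int.toStr run_len) :: pvRunsGo org 1 rest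

def format_source_org_counts_py_alt (ingest_state : Option (List (String × List (List (String × String))))) : String :=
  match ingest_state with
  | none => "未生成"
  | some st =>
    if st = [] then "未生成"
    else
      let orgs := PySem.List.sorted
        (((PySem.Dict.ofList st).getD "records" []).map
          (fun r => (PySem.Dict.ofList r).getD "source_org" "unknown"))
        (fun x => x)
      match orgs with
      | [] => "未生成"
      | o :: rest => PySem.Str.join ", " (pvRunsGo o 1 rest)

-- ===== PRECONDITION & SPEC =====
def Spec_format_source_org_counts_py (ingest_state : Option (List (String × List (List (String × String))))) (out : String) : Prop := out = format_source_org_counts_py_alt ingest_state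
instance (ingest_state : Option (List (String × List (List (String × String))))) (out : String) : Decidable (Spec_format_source_org_counts_py ingest_state out) := by unfold Spec_format_source_org_counts_py; infer_instance

-- ===== CLAIM (what is proved, stated in full; the proofs are below) =====
def Claim_equal_format_source_org_counts_py : Prop := ∀ (ingest_state : Option (List (String × List (List (String × String))))), Dom_format_source_org_counts_py ingest_state → Spec_format_source_org_counts_py ingest_state (format_source_org_counts_py ingest_state)

-- ===== LEMMAS AND PROOFS =====

-- run-length pass of B, starting fresh on a (sorted) list
def pvRunsOf : List String → List String
  | [] => []
  | x :: xs => pvRunsGo x 1 xs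

-- insertBy only looks at comparisons of x against members of ys
theorem pvInsertBy_congr {α : Type} (before before' : α → α → Bool) (x : α) (ys : List α)
    (h : ∀ y ∈ ys, before x y = before' x y) :
    PySem.List.insertBy before x ys = PySem.List.insertBy before' x ys := by
  induction ys with
  | nil => rfl
  | cons y ys ih =>
    rw [show PySem.List.insertBy before x (y :: ys)
          = if before x y then x :: y :: ys else y :: PySem.List.insertBy before x ys from rfl,
        show PySem.List.insertBy before' x (y :: ys)
          = if before' x y then x :: y :: ys else y :: PySem.List.insertBy before' x ys from rfl]
    rw [h y (by simp)]
    by_cases hb : before' x y = true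
    · simp [hb]
    · simp only [hb]
      exact congrArg (y :: ·) (ih (fun z hz => h z (by simp [hz])))

-- the insertion-sort fold only compares elements drawn from S
theorem pvFoldlInsertBy_congr {α : Type} (before before' : α → α → Bool) (S : List α)
    (H : ∀ a ∈ S, ∀ b ∈ S, before a b = before' a b) :
    ∀ (xs acc : List α), (∀ x ∈ xs, x ∈ S) → (∀ y ∈ acc, y ∈ S) →
    xs.foldl (fun acc x => PySem.List.insertBy before x acc) acc
      = xs.foldl (fun acc x => PySem.List.insertBy before' x acc) acc := by
  intro xs
  induction xs with
  | nil => intro acc _ _; rfl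
  | cons x xs ih =>
    intro acc hxs hacc
    have hx : x ∈ S := hxs x (by simp)
    have hstep : PySem.List.insertBy before x acc = PySem.List.insertBy before' x acc :=
      pvInsertBy_congr _ _ _ _ (fun y hy => H x hx y (hacc y hy))
    simp only [List.foldl_cons, hstep]
    exact ih _ (fun z hz => hxs z (by simp [hz]))
      (fun y hy => ((PySem.List.insertBy_mem_iff before' x y acc).mp hy).elim
        (fun h => h ▸ hx) (hacc y))

-- on a list whose first keys are all distinct, Python's tuple sort is the sort by first key
theorem pvSorted2_eq_sorted_fst (xs : List (String × Int)) (hnd : (xs.map (·.1)).Nodup) :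
    PySem.List.sorted2 xs (fun p => p.1) (fun p => p.2) = PySem.List.sorted xs (fun p => p.1) := by
  rw [PySem.List.sorted_eq_foldl_insertBy]
  show xs.foldl (fun acc x => PySem.List.insertBy _ x acc) [] = _
  apply pvFoldlInsertBy_congr _ _ xs _ xs [] (fun _ h => h) (by simp)
  intro a ha b hb
  by_cases hk : a.1 = b.1
  · have hab : a = b := List.inj_on_of_nodup_map hnd ha hb hk
    subst hab
    simp
  · rcases lt_or_gt_of_ne hk with h | h
    · simp [h]
    · simp [h, not_lt_of_gt h]

-- two nodup lists with the same members are permutations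
theorem pvPerm_of_nodup_mem {α : Type} [DecidableEq α] {l l' : List α}
    (h1 : l.Nodup) (h2 : l'.Nodup) (h : ∀ x, x ∈ l ↔ x ∈ l') : l.Perm l' :=
  List.perm_of_nodup_nodup_toFinset_eq h1 h2 (by ext x; simp [h x])

-- B's accumulator loop over the tail of a sorted list: one run for run_key, then fresh runs
theorem pvRunsGo_sorted (t : List String) : ∀ (k : String) (n : Int),
    List.Pairwise (· ≤ ·) (k :: t) →
    pvRunsGo k n t = (k ++ "=" ++ PySem.Int.toStr (n + (t.count k : Int)))
      :: pvRunsOf (t.filter (fun y => y ≠ k)) := by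
  induction t with
  | nil => intro k n _; simp [pvRunsGo, pvRunsOf]
  | cons y ys ih =>
    intro k n hp
    by_cases hy : y = k
    · have hp' : List.Pairwise (· ≤ ·) (k :: ys) := by
        subst hy; exact (List.pairwise_cons.mp hp).2
      rw [show pvRunsGo k n (y :: ys) = pvRunsGo k (n + 1) ys by simp [pvRunsGo, hy]]
      rw [ih k (n + 1) hp']
      have h1 : (y :: ys).filter (fun z => z ≠ k) = ys.filter (fun z => z ≠ k) := by
        simp [hy]
      have h2 : (n + (((y :: ys).count k : Nat) : Int)) = n + 1 + ((ys.count k : Nat) : Int) := by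
        subst hy; rw [List.count_cons_self]; push_cast; ring
      rw [h1, h2]
    · have hky : k ≤ y := (List.pairwise_cons.mp hp).1 y (by simp)
      have hkNotMem : k ∉ y :: ys := by
        intro hmem
        rcases List.mem_cons.mp hmem with h | h
        · exact hy h.symm
        · have h2 := (List.pairwise_cons.mp hp).2
          have hyk : y ≤ k := (List.pairwise_cons.mp h2).1 k h
          exact hy (le_antisymm hky hyk).symm
      rw [show pvRunsGo k n (y :: ys)
            = (k ++ "=" ++ PySem.Int.toStr n) :: pvRunsGo y 1 ys by simp [pvRunsGo, hy]]
      have hcount : (y :: ys).count k = 0 := List.count_eq_zero.mpr hkNotMem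
      have hfilter : (y :: ys).filter (fun z => z ≠ k) = y :: ys := by
        apply List.filter_eq_self.mpr
        intro z hz
        simp only [ne_eq, decide_eq_true_eq]
        intro he; exact hkNotMem (he ▸ hz)
      rw [hcount, hfilter]
      simp only [Nat.cast_zero, add_zero]
      rfl

-- the run-length encoding of a sorted list is the sorted distinct keys with their counts
theorem pvRunsOf_sorted (s : List String) (hs : List.Pairwise (· ≤ ·) s) :
    pvRunsOf s = (PySem.List.sorted (PySem.Set.ofList s) (fun x => x)).map
      (fun k => k ++ "=" ++ PySem.Int.toStr (s.count k : Int)) := by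
  induction hn : s.length using Nat.strong_induction_on generalizing s with
  | _ n ih =>
  cases s with
  | nil => simp [pvRunsOf, PySem.List.sorted_eq_nil_iff]
  | cons h t =>
    have step := pvRunsGo_sorted t h 1 hs
    have ht : List.Pairwise (· ≤ ·) t := (List.pairwise_cons.mp hs).2
    have hhle : ∀ y ∈ t, h ≤ y := (List.pairwise_cons.mp hs).1
    set t' := t.filter (fun y => y ≠ h) with ht'
    have ht'p : List.Pairwise (· ≤ ·) t' := ht.filter _
    have ht'len : t'.length < n := by
      have h1 : t'.length ≤ t.length := by rw [ht']; exact List.length_filter_le _ _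
      have h2 : t.length + 1 = n := by simpa using hn
      omega
    have hrec := ih t'.length ht'len t' ht'p rfl
    -- the sorted distinct keys of h :: t are h followed by the sorted distinct keys of t'
    have hkey : PySem.List.sorted (PySem.Set.ofList (h :: t)) (fun x => x)
        = h :: PySem.List.sorted (PySem.Set.ofList t') (fun x => x) := by
      apply PySem.List.sorted_eq_of_perm_of_pairwise_lt
      · have hmem : ∀ x, x ∈ h :: PySem.List.sorted (PySem.Set.ofList t') (fun x => x)
            ↔ x ∈ PySem.Set.ofList (h :: t) := by
          intro x
          simp only [List.mem_cons, (PySem.List.sorted_perm _ _ _).mem_iff,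
            PySem.Set.mem_ofList, ht', List.mem_filter, ne_eq, decide_eq_true_eq]
          constructor
          · rintro (rfl | ⟨hx, _⟩)
            · exact .inl rfl
            · exact .inr hx
          · rintro (rfl | hx)
            · exact .inl rfl
            · by_cases he : x = h
              · exact .inl he
              · exact .inr ⟨hx, he⟩
        apply pvPerm_of_nodup_mem _ (PySem.Set.nodup_ofList _) hmem
        apply List.nodup_cons.mpr
        constructor
        · intro hmem'
          have : h ∈ t' := (PySem.Set.mem_ofList t' h).mp
            (((PySem.List.sorted_perm (PySem.Set.ofList t') (fun x => x) false).mem_iff).mp hmem')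
          rw [ht'] at this
          simp at this
        · exact ((PySem.List.sorted_perm _ _ _).nodup_iff).mpr (PySem.Set.nodup_ofList _)
      · apply List.pairwise_cons.mpr
        refine ⟨?_, PySem.List.sorted_ofList_pairwise_lt t'⟩
        intro y hy
        have hy' : y ∈ t' := (PySem.Set.mem_ofList t' y).mp
          (((PySem.List.sorted_perm (PySem.Set.ofList t') (fun x => x) false).mem_iff).mp hy)
        rw [ht'] at hy'
        simp only [List.mem_filter, ne_eq, decide_eq_true_eq] at hy'
        exact lt_of_le_of_ne (hhle y hy'.1) (fun e => hy'.2 e.symm)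
    show pvRunsGo h 1 t = _
    rw [step, hrec, hkey, List.map_cons]
    congr 1
    · congr 2
      rw [List.count_cons_self]
      push_cast; ring
    · apply List.map_congr_left
      intro k hk
      have hk' : k ∈ t' := (PySem.Set.mem_ofList t' k).mp
        (((PySem.List.sorted_perm (PySem.Set.ofList t') (fun x => x) false).mem_iff).mp hk)
      rw [ht'] at hk'
      simp only [List.mem_filter, ne_eq, decide_eq_true_eq] at hk'
      congr 2
      rw [ht', List.count_filter (by simp [hk'.2])]
      simp only [List.count_cons, beq_iff_eq]
      rw [if_neg (fun e => hk'.2 e.symm)]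
      simp

-- ===== VERDICT (by name: the statement is the Claim_ definition above) =====
theorem format_source_org_counts_py_spec : Claim_equal_format_source_org_counts_py := by
  intro ingest_state _
  unfold Spec_format_source_org_counts_py
  unfold format_source_org_counts_py format_source_org_counts_py_alt
  cases ingest_state with
  | none => rfl
  | some st =>
    by_cases hst : st = []
    · simp [hst]
    · simp only [hst, if_false]
      generalize (PySem.Dict.ofList st).getD "records" [] = records
      have hcnt : List.foldl
          (fun c record =>
            c.insert ((PySem.Dict.ofList record).getD "source_org" "unknown")
              (c.getD ((PySem.Dict.ofList record).getD "source_org" "unknown") 0 + 1))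
          PySem.Dict.empty records
          = PySem.Dict.counter (records.map
              (fun r => (PySem.Dict.ofList r).getD "source_org" "unknown")) := by
        rw [← PySem.Dict.foldl_insert_getD_add_one_eq_counter, List.foldl_map]
      rw [hcnt]
      generalize records.map (fun r => (PySem.Dict.ofList r).getD "source_org" "unknown") = orgs
      rw [PySem.Dict.items_counter]
      by_cases ho : orgs = []
      · subst ho
        have hs0 : PySem.List.sorted ([] : List String) (fun x => x) = [] :=
          (PySem.List.sorted_eq_nil_iff _ _ _).mpr rfl
        simp [hs0, PySem.Set.ofList]
      · have hset : PySem.Set.ofList orgs ≠ [] := by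
          intro he
          rcases List.exists_mem_of_ne_nil orgs ho with ⟨a, ha⟩
          have hmem : a ∈ PySem.Set.ofList orgs := (PySem.Set.mem_ofList _ _).mpr ha
          rw [he] at hmem
          simp at hmem
        have hmapne : (PySem.Set.ofList orgs).map
            (fun k => (k, (orgs.count k : Int))) ≠ [] := by
          simpa using hset
        simp only [hmapne, if_false]
        cases hsrt : PySem.List.sorted orgs (fun x => x) with
        | nil => exact absurd ((PySem.List.sorted_eq_nil_iff _ _ _).mp hsrt) ho
        | cons o rest =>
          show _ = PySem.Str.join ", " (pvRunsGo o 1 rest)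
          have hnd : (((PySem.Set.ofList orgs).map
              (fun k => (k, (orgs.count k : Int)))).map (·.1)).Nodup := by
            rw [List.map_map]
            have : ((fun p => p.1) ∘ fun k => (k, (orgs.count k : Int))) = id := rfl
            rw [this, List.map_id]
            exact PySem.Set.nodup_ofList _
          rw [pvSorted2_eq_sorted_fst _ hnd]
          have hA : PySem.List.sorted ((PySem.Set.ofList orgs).map
              (fun k => (k, (orgs.count k : Int)))) (fun p => p.1)
              = (PySem.List.sorted (PySem.Set.ofList orgs) (fun x => x)).map
                (fun k => (k, (orgs.count k : Int))) := by
            apply PySem.List.sorted_eq_of_perm_of_pairwise_lt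
            · exact (PySem.List.sorted_perm _ _ _).map _
            · rw [List.pairwise_map]
              exact PySem.List.sorted_ofList_pairwise_lt orgs
          rw [hA]
          have hBs : pvRunsOf (PySem.List.sorted orgs (fun x => x))
              = (PySem.List.sorted (PySem.Set.ofList (PySem.List.sorted orgs (fun x => x)))
                  (fun x => x)).map
                (fun k => k ++ "=" ++ PySem.Int.toStr
                  ((PySem.List.sorted orgs (fun x => x)).count k : Int)) :=
            pvRunsOf_sorted _ (PySem.List.sorted_pairwise orgs _)
          have hsetEq : PySem.List.sorted
              (PySem.Set.ofList (PySem.List.sorted orgs (fun x => x))) (fun x => x)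
              = PySem.List.sorted (PySem.Set.ofList orgs) (fun x => x) := by
            apply PySem.List.sorted_eq_sorted_of_perm _ _ _ (fun a b h => h)
            apply pvPerm_of_nodup_mem (PySem.Set.nodup_ofList _) (PySem.Set.nodup_ofList _)
            intro x
            simp [PySem.Set.mem_ofList, (PySem.List.sorted_perm orgs (fun x => x) false).mem_iff]
          have hcnteq : ∀ k, ((PySem.List.sorted orgs (fun x => x)).count k : Int)
              = (orgs.count k : Int) := by
            intro k
            exact congrArg (fun m : Nat => (m : Int))
              ((PySem.List.sorted_perm orgs (fun x => x) false).count_eq k)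
          rw [show pvRunsGo o 1 rest = pvRunsOf (PySem.List.sorted orgs (fun x => x)) by
            rw [hsrt]; rfl]
          rw [hBs, hsetEq, List.map_map]
          congr 1
          apply List.map_congr_left
          intro k _
          simp [hcnteq k]
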